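-- pv_equiv track=rewrite | github.com/sudeepbhatta1989/her-ai-samantha | backend/lambda_clean/handler.py | needs_web_search
-- ===== SOURCE A (Python) =====
-- def needs_web_search(message):
--     """Detect if user wants web/internet info"""
--     triggers = [
--         'search', 'look up', 'find out', 'what is the latest', 'check online',
--         "news", "current", "today's", "price of", 'weather', 'trending',
--         'internet', 'web', 'google', 'find me', "what's happening",
--         'latest news', 'recent', 'update on', 'status of', 'rate of'
--     ]
--     msg_lower = message.lower()
--     return any(t in msg_lower for t in triggers)
-- ===== SOURCE B (Python) =====
-- def needs_web_search(message):
--     """Detect if user wants web/internet info"""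
--     triggers = [
--         'search', 'look up', 'find out', 'what is the latest', 'check online',
--         "news", "current", "today's", "price of", 'weather', 'trending',
--         'internet', 'web', 'google', 'find me', "what's happening",
--         'latest news', 'recent', 'update on', 'status of', 'rate of'
--     ]
--     m = message.lower()
--     for i in range(len(m)):
--         for t in triggers:
--             if m.startswith(t, i):
--                 return True
--     return False
-- ===== Notes on version B (the rewrite author's own statement) =====
-- stated objective: alternative
-- what changed: B scans the lowered message position by position, testing at each index whether any trigger starts there (single outer pass over positions with early exit), instead of A's per-trigger full substring search over the whole message.
import Mathlib
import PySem

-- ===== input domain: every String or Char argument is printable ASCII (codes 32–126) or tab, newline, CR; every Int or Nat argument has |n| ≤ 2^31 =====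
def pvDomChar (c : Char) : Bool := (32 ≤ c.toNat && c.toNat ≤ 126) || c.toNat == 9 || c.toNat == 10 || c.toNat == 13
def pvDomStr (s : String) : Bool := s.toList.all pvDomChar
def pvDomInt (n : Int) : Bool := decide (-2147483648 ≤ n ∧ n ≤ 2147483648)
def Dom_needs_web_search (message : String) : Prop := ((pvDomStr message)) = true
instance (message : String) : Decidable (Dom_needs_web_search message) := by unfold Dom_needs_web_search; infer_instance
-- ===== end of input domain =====

-- B replaces A's per-trigger substring search with a single position-by-position scan
-- testing each trigger at each index (alternative traversal, same asymptotic cost).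

-- ===== PORT A =====
def nwsTriggersA : List String :=
  ["search", "look up", "find out", "what is the latest", "check online",
   "news", "current", "today's", "price of", "weather", "trending",
   "internet", "web", "google", "find me", "what's happening",
   "latest news", "recent", "update on", "status of", "rate of"]

def needs_web_search (message : String) : Bool :=
  let msg_lower := PySem.Str.lower message
  nwsTriggersA.any (fun t => PySem.Str.isIn t msg_lower)

-- ===== PORT B =====
def nwsTriggersB : List (List Char) :=
  ["search".toList, "look up".toList, "find out".toList, "what is the latest".toList,
   "check online".toList, "news".toList, "current".toList, "today's".toList,
   "price of".toList, "weather".toList, "trending".toList, "internet".toList,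
   "web".toList, "google".toList, "find me".toList, "what's happening".toList,
   "latest news".toList, "recent".toList, "update on".toList, "status of".toList,
   "rate of".toList]

-- the loop 'for i in range(len(m)): for t in triggers: if m.startswith(t, i): return True'
def nwsScan (ts : List (List Char)) : List Char → Bool
  | [] => false
  | c :: rest => ts.any (fun t => PySem.Chars.startswith (c :: rest) t) || nwsScan ts rest

def needs_web_search_alt (message : String) : Bool :=
  nwsScan nwsTriggersB (PySem.Chars.lower message.toList)

-- ===== PRECONDITION & SPEC =====
def Spec_needs_web_search (message : String) (out : Bool) : Prop := out = needs_web_search_alt message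
instance (message : String) (out : Bool) : Decidable (Spec_needs_web_search message out) := by unfold Spec_needs_web_search; infer_instance

-- ===== CLAIM (what is proved, stated in full; the proofs are below) =====
def Claim_equal_needs_web_search : Prop := ∀ (message : String), Dom_needs_web_search message → Spec_needs_web_search message (needs_web_search message)

-- ===== LEMMAS AND PROOFS =====

-- the position scan finds exactly the triggers that occur as substrings (triggers nonempty)
theorem nwsScan_eq_any_isIn (ts : List (List Char)) (h : ∀ t ∈ ts, t ≠ []) :
    ∀ s : List Char, nwsScan ts s = ts.any (fun t => PySem.Chars.isIn t s) := by
  intro s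
  induction s with
  | nil =>
    rw [show nwsScan ts [] = false from rfl]
    symm
    rw [List.any_eq_false]
    intro t ht
    rw [PySem.Chars.isIn_iff_infix]
    intro hinf
    exact h t ht (List.eq_nil_of_infix_nil hinf)
  | cons c rest ih =>
    simp only [nwsScan, ih]
    rw [Bool.eq_iff_iff]
    simp only [Bool.or_eq_true, List.any_eq_true, PySem.Chars.startswith_iff,
      PySem.Chars.isIn_iff_infix, List.infix_cons_iff]
    constructor
    · rintro (⟨x, hx, hp⟩ | ⟨x, hx, hq⟩)
      · exact ⟨x, hx, Or.inl hp⟩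
      · exact ⟨x, hx, Or.inr hq⟩
    · rintro ⟨x, hx, hp | hq⟩
      · exact Or.inl ⟨x, hx, hp⟩
      · exact Or.inr ⟨x, hx, hq⟩

-- ===== VERDICT (by name: the statement is the Claim_ definition above) =====
theorem needs_web_search_spec : Claim_equal_needs_web_search := by
  intro message _
  unfold Spec_needs_web_search needs_web_search needs_web_search_alt
  rw [nwsScan_eq_any_isIn nwsTriggersB (by decide)]
  simp only [nwsTriggersA, nwsTriggersB, List.any_cons, List.any_nil,
    PySem.Str.isIn_eq, PySem.Str.toList_lower]
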